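-- pv_equiv track=rewrite | github.com/DennisChunikhin/Oscilloscope-Music | contour.py | combine_contours
-- ===== SOURCE A (Python) =====
-- def combine_contours(contours):
--     contours_combined = []
--
--     # Go through each contour
--     for i in range(len(contours)):
--         standalone = True
--
--         # Check if this contour connects to any of the other contours
--         contour = contours[i]
--         for j in range(i+1, len(contours)):
--             parent_contour = contours[j]
--
--             # If so, connect it to the other contour (using another icky else if ladder of course)
--             if contour[0] == parent_contour[0]:
--                 contours[j] = contour[:0:-1] + parent_contour
--                 standalone = False
--                 break
--             elif contour[-1] == parent_contour[0]:
--                 contours[j] = contour[:-1] + parent_contour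
--                 standalone = False
--                 break
--             elif contour[0] == parent_contour[-1]:
--                 contours[j] = parent_contour + contour[1:]
--                 standalone = False
--                 break
--             elif contour[-1] == parent_contour[-1]:
--                 contours[j] = parent_contour + contour[-2::-1]
--                 standalone = False
--                 break
--
--         # If the contour does not connect to any other contours, add it to the list of full contours
--         if standalone:
--             contours_combined.append(contour)
--
--     return contours_combined
-- ===== SOURCE B (Python) =====
-- def combine_contours(contours):
--     # Endpoint index: point -> set of indices j whose contour currently starts or ends there.
--     index = {}
--
--     def add(j):
--         c = contours[j]
--         index.setdefault(c[0], set()).add(j)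
--         index.setdefault(c[-1], set()).add(j)
--
--     def remove(j):
--         c = contours[j]
--         index.get(c[0], set()).discard(j)
--         index.get(c[-1], set()).discard(j)
--
--     for j in range(len(contours)):
--         add(j)
--
--     contours_combined = []
--     for i in range(len(contours)):
--         remove(i)
--         contour = contours[i]
--         candidates = index.get(contour[0], set()) | index.get(contour[-1], set())
--         if not candidates:
--             contours_combined.append(contour)
--             continue
--         j = min(candidates)
--         remove(j)
--         parent_contour = contours[j]
--         if contour[0] == parent_contour[0]:
--             merged = contour[:0:-1] + parent_contour
--         elif contour[-1] == parent_contour[0]: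
--             merged = contour[:-1] + parent_contour
--         elif contour[0] == parent_contour[-1]:
--             merged = parent_contour + contour[1:]
--         else:
--             merged = parent_contour + contour[-2::-1]
--         contours[j] = merged
--         add(j)
--     return contours_combined
-- ===== Notes on version B (the rewrite author's own statement) =====
-- stated objective: faster
-- what changed: B replaces A's quadratic scan of all later contours with a dict mapping each endpoint to the set of contour indices starting or ending there; the merge partner is the minimum candidate index from two lookups, and the index is updated on each merge.
-- outside the precondition, e.g. on combine_contours([[]]): A returns [[]], B raises IndexError
import Mathlib
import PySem

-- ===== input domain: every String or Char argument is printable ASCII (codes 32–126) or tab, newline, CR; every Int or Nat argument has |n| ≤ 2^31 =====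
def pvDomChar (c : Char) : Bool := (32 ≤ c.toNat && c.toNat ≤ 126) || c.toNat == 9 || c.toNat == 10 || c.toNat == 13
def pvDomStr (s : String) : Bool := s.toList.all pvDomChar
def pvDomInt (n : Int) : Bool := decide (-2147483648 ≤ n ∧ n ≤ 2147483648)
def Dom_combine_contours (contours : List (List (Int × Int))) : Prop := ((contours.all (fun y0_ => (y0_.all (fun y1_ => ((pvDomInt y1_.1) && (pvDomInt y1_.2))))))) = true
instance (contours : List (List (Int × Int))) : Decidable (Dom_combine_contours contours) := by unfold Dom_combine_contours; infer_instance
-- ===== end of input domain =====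

-- B replaces A's O(n^2) pairwise endpoint scan by a dict indexing endpoints -> contour indices
-- (objective: faster; both A and B mutate their argument list in place in Python — the
-- equivalence proved here is about the RETURN value; B performs the same mutation).


-- ===== PORT A =====
-- c[0] / c[-1]; total via a default — Pre_ guarantees every contour is nonempty in both ports.
def pvHd (c : List (Int × Int)) : Int × Int := c.headD (0, 0)
def pvLst (c : List (Int × Int)) : Int × Int := c.getLastD (0, 0)

-- A's inner loop: first j in [j, n) whose contour shares an endpoint, with the merged contour.
-- contour[:0:-1] is ported as (c.drop 1).reverse and contour[-2::-1] as c.dropLast.reverse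
-- (exact for every list); contour[:-1] as c.dropLast and contour[1:] as c.drop 1.
def aFind (contour : List (Int × Int)) (cs : List (List (Int × Int))) (j n : Nat) :
    Option (Nat × List (Int × Int)) :=
  if _h : j < n then
    let p := cs.getD j []
    if pvHd contour = pvHd p then some (j, (contour.drop 1).reverse ++ p)
    else if pvLst contour = pvHd p then some (j, contour.dropLast ++ p)
    else if pvHd contour = pvLst p then some (j, p ++ contour.drop 1)
    else if pvLst contour = pvLst p then some (j, p ++ contour.dropLast.reverse)
    else aFind contour cs (j + 1) n
  else none
termination_by n - j

-- A's outer loop over i, mutating cs[j] on a merge, appending standalone contours.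
def aLoop (cs : List (List (Int × Int))) (i n : Nat) (acc : List (List (Int × Int))) :
    List (List (Int × Int)) :=
  if _h : i < n then
    let contour := cs.getD i []
    match aFind contour cs (i + 1) n with
    | some (j, m) => aLoop (cs.set j m) (i + 1) n acc
    | none => aLoop cs (i + 1) n (acc ++ [contour])
  else acc
termination_by n - i

def combine_contours (contours : List (List (Int × Int))) : List (List (Int × Int)) :=
  aLoop contours 0 contours.length []

-- ===== PORT B =====
-- index.get(q, set()).discard(j)  (mutating the stored set in place when present)
def bDiscard (d : PySem.Dict (Int × Int) (PySem.Set Nat)) (q : Int × Int) (j : Nat) :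
    PySem.Dict (Int × Int) (PySem.Set Nat) :=
  match d.get? q with
  | some s => d.insert q (PySem.Set.discard s j)
  | none => d

-- index.setdefault(q, set()).add(j)
def bSetAdd (d : PySem.Dict (Int × Int) (PySem.Set Nat)) (q : Int × Int) (j : Nat) :
    PySem.Dict (Int × Int) (PySem.Set Nat) :=
  d.insert q (PySem.Set.add (d.getD q PySem.Set.empty) j)

def bAdd (cs : List (List (Int × Int))) (d : PySem.Dict (Int × Int) (PySem.Set Nat)) (j : Nat) :
    PySem.Dict (Int × Int) (PySem.Set Nat) :=
  let c := cs.getD j []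
  bSetAdd (bSetAdd d (pvHd c) j) (pvLst c) j

def bRemove (cs : List (List (Int × Int))) (d : PySem.Dict (Int × Int) (PySem.Set Nat)) (j : Nat) :
    PySem.Dict (Int × Int) (PySem.Set Nat) :=
  let c := cs.getD j []
  bDiscard (bDiscard d (pvHd c) j) (pvLst c) j

-- B's main loop: drop i from the index, look the two endpoints up, merge with the least
-- candidate index (Python's min over the candidate set), reindex the merged contour.
def bLoop (cs : List (List (Int × Int))) (d : PySem.Dict (Int × Int) (PySem.Set Nat))
    (i n : Nat) (acc : List (List (Int × Int))) : List (List (Int × Int)) :=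
  if _h : i < n then
    let d1 := bRemove cs d i
    let contour := cs.getD i []
    let cand := PySem.Set.union (d1.getD (pvHd contour) PySem.Set.empty)
                                (d1.getD (pvLst contour) PySem.Set.empty)
    match PySem.List.min? cand (fun x => x) with
    | none => bLoop cs d1 (i + 1) n (acc ++ [contour])
    | some j =>
      let d2 := bRemove cs d1 j
      let p := cs.getD j []
      let m := if pvHd contour = pvHd p then (contour.drop 1).reverse ++ p
               else if pvLst contour = pvHd p then contour.dropLast ++ p
               else if pvHd contour = pvLst p then p ++ contour.drop 1
               else p ++ contour.dropLast.reverse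
      let cs' := cs.set j m
      bLoop cs' (bAdd cs' d2 j) (i + 1) n acc
  else acc
termination_by n - i

def combine_contours_alt (contours : List (List (Int × Int))) : List (List (Int × Int)) :=
  bLoop contours ((List.range contours.length).foldl (bAdd contours) PySem.Dict.empty)
    0 contours.length []

-- ===== PRECONDITION & SPEC =====
-- Pre_ excludes inputs containing an empty contour: on them Python A raises IndexError
-- (except the degenerate input [[]], where A returns [[]]) and B's endpoint indexing raises.
def Pre_combine_contours (contours : List (List (Int × Int))) : Prop :=
  ∀ c ∈ contours, c ≠ ([] : List (Int × Int))
instance (contours : List (List (Int × Int))) : Decidable (Pre_combine_contours contours) := by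
  unfold Pre_combine_contours; infer_instance

def pvWitness_combine_contours : (List (List (Int × Int))) :=
  [[(0, 0), (1, 1)], [(1, 1), (2, 2)], [(5, 5)]]

def Spec_combine_contours (contours : List (List (Int × Int))) (out : List (List (Int × Int))) : Prop := out = combine_contours_alt contours
instance (contours : List (List (Int × Int))) (out : List (List (Int × Int))) : Decidable (Spec_combine_contours contours out) := by unfold Spec_combine_contours; infer_instance

-- ===== CLAIM (what is proved, stated in full; the proofs are below) =====
def Claim_equal_combine_contours : Prop := ∀ (contours : List (List (Int × Int))), Dom_combine_contours contours → Pre_combine_contours contours → Spec_combine_contours contours (combine_contours contours)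

-- ===== LEMMAS AND PROOFS =====

-- The shared-endpoint relation and the merged contour (the four-branch ladder both versions use).
abbrev pvMatch (c p : List (Int × Int)) : Prop :=
  pvHd c = pvHd p ∨ pvLst c = pvHd p ∨ pvHd c = pvLst p ∨ pvLst c = pvLst p

def pvMerge (c p : List (Int × Int)) : List (Int × Int) :=
  if pvHd c = pvHd p then (c.drop 1).reverse ++ p
  else if pvLst c = pvHd p then c.dropLast ++ p
  else if pvHd c = pvLst p then p ++ c.drop 1
  else p ++ c.dropLast.reverse

-- First matching index in [j, n).
def pvFirst (c : List (Int × Int)) (cs : List (List (Int × Int))) (j n : Nat) : Option Nat :=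
  (List.range' j (n - j)).find? (fun k => decide (pvMatch c (cs.getD k [])))

theorem find_none (f : Nat → Bool) (len s : Nat) :
    ((List.range' s len).find? f = none ↔ ∀ k, s ≤ k → k < s + len → f k ≠ true) := by
  rw [List.find?_eq_none]
  constructor
  · intro h k h1 h2; exact h k (List.mem_range'_1.mpr ⟨h1, h2⟩)
  · intro h x hx; rcases List.mem_range'_1.mp hx with ⟨h1, h2⟩; exact h x h1 h2

theorem find_some (f : Nat → Bool) : ∀ (len s k : Nat),
    ((List.range' s len).find? f = some k ↔
      (s ≤ k ∧ k < s + len ∧ f k = true ∧ ∀ l, s ≤ l → l < k → f l ≠ true)) := by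
  intro len
  induction len with
  | zero => intro s k; simp; omega
  | succ m ih =>
    intro s k
    rw [List.range'_succ, List.find?_cons]
    cases hfs : f s with
    | true =>
      constructor
      · rintro h; cases h; exact ⟨le_refl _, by omega, hfs, by omega⟩
      · rintro ⟨h1, h2, h3, h4⟩
        by_cases hk : k = s
        · simp [hk]
        · exact absurd hfs (h4 s (le_refl _) (by omega))
    | false =>
      rw [ih (s + 1) k]
      constructor
      · rintro ⟨h1, h2, h3, h4⟩
        refine ⟨by omega, by omega, h3, ?_⟩
        intro l hl1 hl2
        by_cases hls : l = s
        · subst hls; simp [hfs]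
        · exact h4 l (by omega) hl2
      · rintro ⟨h1, h2, h3, h4⟩
        have hks : k ≠ s := by rintro rfl; rw [h3] at hfs; cases hfs
        exact ⟨by omega, by omega, h3, fun l hl1 hl2 => h4 l (by omega) hl2⟩

theorem aFind_eq (c : List (Int × Int)) (cs : List (List (Int × Int))) (j n : Nat) :
    aFind c cs j n = (pvFirst c cs j n).map (fun k => (k, pvMerge c (cs.getD k []))) := by
  induction j using aFind.induct c cs n with
  | case1 j h p h1 =>
    rw [aFind]
    unfold pvFirst
    rw [show n - j = (n - (j+1)) + 1 from by omega, List.range'_succ, List.find?_cons]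
    have hm : decide (pvMatch c (cs.getD j [])) = true := by
      simp only [decide_eq_true_eq]; unfold pvMatch; left; exact h1
    rw [hm]
    simp only [dif_pos h, Option.map_some]
    rw [if_pos h1]
    have hmg : pvMerge c (cs.getD j []) = (c.drop 1).reverse ++ cs.getD j [] := by
      unfold pvMerge
      rw [if_pos (show pvHd c = pvHd (cs.getD j []) from h1)]
    rw [hmg]
  | case2 j h p h1 h2 =>
    rw [aFind]
    unfold pvFirst
    rw [show n - j = (n - (j+1)) + 1 from by omega, List.range'_succ, List.find?_cons]
    have hm : decide (pvMatch c (cs.getD j [])) = true := by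
      simp only [decide_eq_true_eq]; unfold pvMatch; tauto
    rw [hm]
    simp only [dif_pos h, Option.map_some]
    rw [if_neg h1, if_pos h2]
    have hmg : pvMerge c (cs.getD j []) = c.dropLast ++ cs.getD j [] := by
      unfold pvMerge
      rw [if_neg (show ¬ pvHd c = pvHd (cs.getD j []) from h1),
        if_pos (show pvLst c = pvHd (cs.getD j []) from h2)]
    rw [hmg]
  | case3 j h p h1 h2 h3 =>
    rw [aFind]
    unfold pvFirst
    rw [show n - j = (n - (j+1)) + 1 from by omega, List.range'_succ, List.find?_cons]
    have hm : decide (pvMatch c (cs.getD j [])) = true := by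
      simp only [decide_eq_true_eq]; unfold pvMatch; tauto
    rw [hm]
    simp only [dif_pos h, Option.map_some]
    rw [if_neg h1, if_neg h2, if_pos h3]
    have hmg : pvMerge c (cs.getD j []) = cs.getD j [] ++ c.drop 1 := by
      unfold pvMerge
      rw [if_neg (show ¬ pvHd c = pvHd (cs.getD j []) from h1),
        if_neg (show ¬ pvLst c = pvHd (cs.getD j []) from h2),
        if_pos (show pvHd c = pvLst (cs.getD j []) from h3)]
    rw [hmg]
  | case4 j h p h1 h2 h3 h4 =>
    rw [aFind]
    unfold pvFirst
    rw [show n - j = (n - (j+1)) + 1 from by omega, List.range'_succ, List.find?_cons]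
    have hm : decide (pvMatch c (cs.getD j [])) = true := by
      simp only [decide_eq_true_eq]; unfold pvMatch; tauto
    rw [hm]
    simp only [dif_pos h, Option.map_some]
    rw [if_neg h1, if_neg h2, if_neg h3, if_pos h4]
    have hmg : pvMerge c (cs.getD j []) = cs.getD j [] ++ c.dropLast.reverse := by
      unfold pvMerge
      rw [if_neg (show ¬ pvHd c = pvHd (cs.getD j []) from h1),
        if_neg (show ¬ pvLst c = pvHd (cs.getD j []) from h2),
        if_neg (show ¬ pvHd c = pvLst (cs.getD j []) from h3)]
    rw [hmg]
  | case5 j h p h1 h2 h3 h4 ih =>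
    rw [aFind]
    unfold pvFirst
    rw [show n - j = (n - (j+1)) + 1 from by omega, List.range'_succ, List.find?_cons]
    have hm : decide (pvMatch c (cs.getD j [])) = false := by
      simp only [decide_eq_false_iff_not]; unfold pvMatch; tauto
    rw [hm]
    simp only [dif_pos h]
    rw [if_neg (show ¬ pvHd c = pvHd (cs.getD j []) from h1),
      if_neg (show ¬ pvLst c = pvHd (cs.getD j []) from h2),
      if_neg (show ¬ pvHd c = pvLst (cs.getD j []) from h3),
      if_neg (show ¬ pvLst c = pvLst (cs.getD j []) from h4)]
    exact ih
  | case6 j h =>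
    rw [aFind]
    unfold pvFirst
    rw [show n - j = 0 from by omega]
    simp [h]


theorem pvFirst_eq_some_iff (c : List (Int × Int)) (cs : List (List (Int × Int))) (j n k : Nat) :
    pvFirst c cs j n = some k ↔
      (j ≤ k ∧ k < n ∧ pvMatch c (cs.getD k []) ∧
        ∀ l, j ≤ l → l < k → ¬ pvMatch c (cs.getD l [])) := by
  unfold pvFirst
  rw [find_some]
  simp only [ne_eq, decide_eq_true_eq]
  constructor
  · rintro ⟨h1, h2, h3, h4⟩; exact ⟨h1, by omega, h3, h4⟩
  · rintro ⟨h1, h2, h3, h4⟩; exact ⟨h1, by omega, h3, h4⟩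

theorem pvFirst_eq_none_iff (c : List (Int × Int)) (cs : List (List (Int × Int))) (j n : Nat) :
    pvFirst c cs j n = none ↔ ∀ k, j ≤ k → k < n → ¬ pvMatch c (cs.getD k []) := by
  unfold pvFirst
  rw [find_none]
  simp only [ne_eq, decide_eq_true_eq]
  constructor
  · intro h k h1 h2; exact h k h1 (by omega)
  · intro h k h1 h2; exact h k h1 (by omega)

-- Endpoint-index invariant: d maps each point to exactly the indices in [i, n) whose
-- current contour starts or ends there.
def pvInv (d : PySem.Dict (Int × Int) (PySem.Set Nat)) (cs : List (List (Int × Int)))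
    (i n : Nat) : Prop :=
  ∀ p j, j ∈ d.getD p PySem.Set.empty ↔
    (i ≤ j ∧ j < n ∧ (pvHd (cs.getD j []) = p ∨ pvLst (cs.getD j []) = p))

theorem bSetAdd_mem (d : PySem.Dict (Int × Int) (PySem.Set Nat)) (q : Int × Int) (j j' : Nat)
    (p : Int × Int) :
    (j' ∈ (bSetAdd d q j).getD p PySem.Set.empty) ↔
      (j' ∈ d.getD p PySem.Set.empty ∨ (j' = j ∧ p = q)) := by
  unfold bSetAdd
  rw [PySem.Dict.getD_insert]
  by_cases hpq : p = q
  · subst hpq; simp [PySem.Set.mem_add]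
  · simp [hpq]

theorem bDiscard_mem (d : PySem.Dict (Int × Int) (PySem.Set Nat)) (q : Int × Int) (j j' : Nat)
    (p : Int × Int) :
    (j' ∈ (bDiscard d q j).getD p PySem.Set.empty) ↔
      (j' ∈ d.getD p PySem.Set.empty ∧ ¬ (j' = j ∧ p = q)) := by
  unfold bDiscard
  cases hget : d.get? q with
  | none =>
    by_cases hpq : p = q
    · subst hpq
      rw [PySem.Dict.getD_eq_get?_getD, hget]
      simp [PySem.Set.empty]
    · tauto
  | some s =>
    rw [PySem.Dict.getD_insert]
    by_cases hpq : p = q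
    · subst hpq
      rw [PySem.Dict.getD_eq_get?_getD, hget]
      simp [PySem.Set.mem_discard]
    · simp [hpq]

theorem bAdd_mem (cs : List (List (Int × Int))) (d : PySem.Dict (Int × Int) (PySem.Set Nat))
    (j j' : Nat) (p : Int × Int) :
    (j' ∈ (bAdd cs d j).getD p PySem.Set.empty) ↔
      (j' ∈ d.getD p PySem.Set.empty ∨
        (j' = j ∧ (pvHd (cs.getD j []) = p ∨ pvLst (cs.getD j []) = p))) := by
  unfold bAdd
  rw [bSetAdd_mem, bSetAdd_mem]
  tauto

theorem bRemove_mem (cs : List (List (Int × Int))) (d : PySem.Dict (Int × Int) (PySem.Set Nat))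
    (j j' : Nat) (p : Int × Int) :
    (j' ∈ (bRemove cs d j).getD p PySem.Set.empty) ↔
      (j' ∈ d.getD p PySem.Set.empty ∧
        ¬ (j' = j ∧ (pvHd (cs.getD j []) = p ∨ pvLst (cs.getD j []) = p))) := by
  unfold bRemove
  rw [bDiscard_mem, bDiscard_mem]
  tauto

theorem foldl_bAdd_mem (cs : List (List (Int × Int))) (k j' : Nat) (p : Int × Int) :
    (j' ∈ ((List.range k).foldl (bAdd cs) PySem.Dict.empty).getD p PySem.Set.empty) ↔
      (j' < k ∧ (pvHd (cs.getD j' []) = p ∨ pvLst (cs.getD j' []) = p)) := by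
  induction k with
  | zero =>
    rw [List.range_zero, List.foldl_nil, PySem.Dict.getD_empty]
    simp [PySem.Set.empty]
  | succ m ih =>
    rw [List.range_succ, List.foldl_append, List.foldl_cons, List.foldl_nil, bAdd_mem, ih]
    constructor
    · rintro (⟨h1, h2⟩ | ⟨rfl, h2⟩)
      · exact ⟨by omega, h2⟩
      · exact ⟨by omega, h2⟩
    · rintro ⟨h1, h2⟩
      by_cases hj : j' = m
      · subst hj; right; exact ⟨rfl, h2⟩
      · left; exact ⟨by omega, h2⟩

theorem Inv_init (cs : List (List (Int × Int))) :
    pvInv ((List.range cs.length).foldl (bAdd cs) PySem.Dict.empty) cs 0 cs.length := by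
  intro p j
  rw [foldl_bAdd_mem]
  constructor
  · rintro ⟨h1, h2⟩; exact ⟨by omega, h1, h2⟩
  · rintro ⟨h1, h2, h3⟩; exact ⟨h2, h3⟩

theorem getD_set_self (cs : List (List (Int × Int))) (j : Nat) (m : List (Int × Int))
    (h : j < cs.length) : (cs.set j m).getD j [] = m := by
  simp [List.getD_eq_getElem?_getD, h]

theorem getD_set_ne (cs : List (List (Int × Int))) (j j' : Nat) (m : List (Int × Int))
    (h : j' ≠ j) : (cs.set j m).getD j' [] = cs.getD j' [] := by
  simp [List.getD_eq_getElem?_getD, List.getElem?_set_ne (Ne.symm h)]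

theorem step_remove (d : PySem.Dict (Int × Int) (PySem.Set Nat)) (cs : List (List (Int × Int)))
    (i n : Nat) (h : pvInv d cs i n) : pvInv (bRemove cs d i) cs (i + 1) n := by
  intro p j
  rw [bRemove_mem, h]
  constructor
  · rintro ⟨⟨h1, h2, h3⟩, h4⟩
    refine ⟨?_, h2, h3⟩
    rcases Nat.lt_or_ge i j with hlt | hge
    · omega
    · exfalso; have hji : j = i := by omega
      subst hji; exact h4 ⟨rfl, h3⟩
  · rintro ⟨h1, h2, h3⟩
    exact ⟨⟨by omega, h2, h3⟩, by rintro ⟨rfl, _⟩; omega⟩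

theorem step_merge (d : PySem.Dict (Int × Int) (PySem.Set Nat)) (cs : List (List (Int × Int)))
    (t j : Nat) (m : List (Int × Int)) (h : pvInv d cs t cs.length) (hj1 : t ≤ j)
    (hj2 : j < cs.length) :
    pvInv (bAdd (cs.set j m) (bRemove cs d j) j) (cs.set j m) t cs.length := by
  intro p j'
  rw [bAdd_mem, bRemove_mem, h]
  by_cases hjj : j' = j
  · subst hjj
    rw [getD_set_self cs j' m hj2]
    constructor
    · rintro (⟨⟨h1, h2, h3⟩, h4⟩ | ⟨_, h2⟩)
      · exact absurd ⟨rfl, h3⟩ h4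
      · exact ⟨hj1, hj2, h2⟩
    · rintro ⟨h1, h2, h3⟩; right; exact ⟨rfl, h3⟩
  · rw [getD_set_ne cs j j' m hjj]
    constructor
    · rintro (⟨⟨h1, h2, h3⟩, _⟩ | ⟨hjj', _⟩)
      · exact ⟨h1, h2, h3⟩
      · exact absurd hjj' hjj
    · rintro ⟨h1, h2, h3⟩
      left
      exact ⟨⟨h1, h2, h3⟩, by rintro ⟨rfl, _⟩; exact hjj rfl⟩

theorem min_cand (d : PySem.Dict (Int × Int) (PySem.Set Nat)) (cs : List (List (Int × Int)))
    (t n : Nat) (c : List (Int × Int)) (h : pvInv d cs t n) :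
    PySem.List.min? (PySem.Set.union (d.getD (pvHd c) PySem.Set.empty)
        (d.getD (pvLst c) PySem.Set.empty)) (fun x => x) = pvFirst c cs t n := by
  set cand := PySem.Set.union (d.getD (pvHd c) PySem.Set.empty)
      (d.getD (pvLst c) PySem.Set.empty) with hcand
  have hmem : ∀ j, j ∈ cand ↔ (t ≤ j ∧ j < n ∧ pvMatch c (cs.getD j [])) := by
    intro j
    rw [hcand, PySem.Set.mem_union, h, h]
    unfold pvMatch
    constructor
    · rintro (⟨h1, h2, h3⟩ | ⟨h1, h2, h3⟩) <;> exact ⟨h1, h2, by tauto⟩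
    · rintro ⟨h1, h2, h3 | h3 | h3 | h3⟩
      · left; exact ⟨h1, h2, Or.inl h3.symm⟩
      · right; exact ⟨h1, h2, Or.inl h3.symm⟩
      · left; exact ⟨h1, h2, Or.inr h3.symm⟩
      · right; exact ⟨h1, h2, Or.inr h3.symm⟩
  cases hf : pvFirst c cs t n with
  | none =>
    rw [pvFirst_eq_none_iff] at hf
    have : cand = [] := by
      apply List.eq_nil_iff_forall_not_mem.mpr
      intro j hj
      rcases (hmem j).mp hj with ⟨h1, h2, h3⟩
      exact hf j h1 h2 h3
    rw [this]
    simp [PySem.List.min?]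
  | some k =>
    rw [pvFirst_eq_some_iff] at hf
    rcases hf with ⟨h1, h2, h3, h4⟩
    have hkc : k ∈ cand := (hmem k).mpr ⟨h1, h2, h3⟩
    cases hmin : PySem.List.min? cand (fun x => x) with
    | none =>
      rw [PySem.List.min?_eq_none_iff] at hmin
      rw [hmin] at hkc
      cases hkc
    | some mm =>
      have hmmem : mm ∈ cand := PySem.List.min?_mem hmin
      have hmin' : ∀ y ∈ cand, mm ≤ y := fun y hy => PySem.List.min?_isMin hmin y hy
      rcases (hmem mm).mp hmmem with ⟨g1, g2, g3⟩
      have hkm : mm ≤ k := hmin' k hkc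
      have hmk : k ≤ mm := by
        by_contra hlt
        exact h4 mm g1 (by omega) g3
      congr
      omega

-- The bridge: under the invariant the two loops agree.
theorem bridge (k : Nat) : ∀ (cs : List (List (Int × Int)))
    (d : PySem.Dict (Int × Int) (PySem.Set Nat)) (i : Nat) (acc : List (List (Int × Int))),
    cs.length - i = k → pvInv d cs i cs.length →
    aLoop cs i cs.length acc = bLoop cs d i cs.length acc := by
  induction k with
  | zero =>
    intro cs d i acc hk _
    have h : ¬ i < cs.length := by omega
    rw [aLoop, bLoop]
    simp [h]
  | succ kk ih =>
    intro cs d i acc hk hinv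
    have h : i < cs.length := by omega
    have hinv1 : pvInv (bRemove cs d i) cs (i + 1) cs.length := step_remove d cs i _ hinv
    rw [aLoop, bLoop]
    simp only [dif_pos h]
    rw [aFind_eq]
    rw [min_cand (bRemove cs d i) cs (i + 1) cs.length (cs.getD i []) hinv1]
    cases hf : pvFirst (cs.getD i []) cs (i + 1) cs.length with
    | none =>
      simp only [Option.map_none]
      exact ih cs (bRemove cs d i) (i + 1) (acc ++ [cs.getD i []]) (by omega) hinv1
    | some j =>
      simp only [Option.map_some]
      rcases (pvFirst_eq_some_iff _ _ _ _ _).mp hf with ⟨hj1, hj2, _, _⟩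
      show aLoop (cs.set j (pvMerge (cs.getD i []) (cs.getD j []))) (i + 1) cs.length acc = _
      have hmg : (if pvHd (cs.getD i []) = pvHd (cs.getD j []) then
            ((cs.getD i []).drop 1).reverse ++ cs.getD j []
          else if pvLst (cs.getD i []) = pvHd (cs.getD j []) then
            (cs.getD i []).dropLast ++ cs.getD j []
          else if pvHd (cs.getD i []) = pvLst (cs.getD j []) then
            cs.getD j [] ++ (cs.getD i []).drop 1
          else cs.getD j [] ++ (cs.getD i []).dropLast.reverse) =
          pvMerge (cs.getD i []) (cs.getD j []) := rfl
      rw [hmg]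
      have hinv2 := step_merge (bRemove cs d i) cs (i + 1)
        j (pvMerge (cs.getD i []) (cs.getD j [])) hinv1 hj1 hj2
      have hlen : (cs.set j (pvMerge (cs.getD i []) (cs.getD j []))).length = cs.length :=
        List.length_set
      rw [← hlen]
      rw [← hlen] at hinv2
      exact ih _ _ (i + 1) acc (by rw [hlen]; omega) hinv2

-- ===== VERDICT (by name: the statement is the Claim_ definition above) =====
theorem combine_contours_spec : Claim_equal_combine_contours := by
  intro cs _ _
  unfold Spec_combine_contours combine_contours combine_contours_alt
  exact bridge (cs.length - 0) cs _ 0 [] rfl (Inv_init cs)
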